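-- pv_equiv track=rewrite | github.com/zainkhatri/conference_buddy | bot/bot.py | resolve_with_inheritance
-- ===== SOURCE A (Python) =====
-- def resolve_with_inheritance(entry, hs_id_map, depth=0):
--     """Return an entry with missing ownerName/icpTier/category filled from the parent chain.
--     Child's own non-empty values always win."""
--     if not entry or depth > 3: return entry
--     filled = dict(entry)
--     if filled.get("ownerName") and filled.get("icpTier") and filled.get("category"):
--         return filled
--     pid = filled.get("parentId")
--     if pid and pid in hs_id_map:
--         parent = resolve_with_inheritance(hs_id_map[pid], hs_id_map, depth + 1)
--         for k in ("ownerName", "icpTier", "category"):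
--             if not filled.get(k) and parent.get(k):
--                 filled[k] = parent[k]
--     return filled
-- ===== SOURCE B (Python) =====
-- def resolve_with_inheritance(entry, hs_id_map, depth=0):
--     """Iterative re-implementation: walk the parent chain once (flat loop),
--     then resolve each missing field from the nearest ancestor in a single pass."""
--     if not entry or depth > 3:
--         return entry
--     # collect the ancestor chain reachable within the depth window
--     chain = []
--     cur, i = entry, depth
--     while i <= 3:
--         pid = cur.get("parentId")
--         if not pid or pid not in hs_id_map:
--             break
--         cur = hs_id_map[pid]
--         chain.append(cur)
--         i += 1
--     filled = dict(entry)
--     for k in ("ownerName", "icpTier", "category"):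
--         if not filled.get(k):
--             v = next((a[k] for a in chain if a.get(k)), None)
--             if v is not None:
--                 filled[k] = v
--     return filled
-- ===== Notes on version B (the rewrite author's own statement) =====
-- stated objective: alternative
-- what changed: Replaces A's top-down recursion (resolve parent fully, then copy missing fields down one level at a time) with a flat iterative walk that collects the ancestor chain once and then resolves each missing field from the nearest ancestor in a single pass.
import Mathlib
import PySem

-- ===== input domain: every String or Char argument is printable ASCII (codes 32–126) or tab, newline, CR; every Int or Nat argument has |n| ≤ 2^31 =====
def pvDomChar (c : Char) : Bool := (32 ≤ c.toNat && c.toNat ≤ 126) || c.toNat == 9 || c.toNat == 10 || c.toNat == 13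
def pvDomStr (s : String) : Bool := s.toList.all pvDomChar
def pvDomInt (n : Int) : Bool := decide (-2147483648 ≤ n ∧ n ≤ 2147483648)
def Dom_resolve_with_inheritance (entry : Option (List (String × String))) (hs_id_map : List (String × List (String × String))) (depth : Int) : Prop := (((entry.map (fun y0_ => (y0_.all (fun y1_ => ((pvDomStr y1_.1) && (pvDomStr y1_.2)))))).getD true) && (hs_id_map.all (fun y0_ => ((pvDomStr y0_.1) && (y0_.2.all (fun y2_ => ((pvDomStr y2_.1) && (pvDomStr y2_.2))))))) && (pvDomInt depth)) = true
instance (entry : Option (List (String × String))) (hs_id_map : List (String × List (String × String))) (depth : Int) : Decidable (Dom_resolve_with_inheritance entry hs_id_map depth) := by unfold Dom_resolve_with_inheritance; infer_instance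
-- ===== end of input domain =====

-- B replaces A's recursion by a flat chain walk + single resolution pass (alternative
-- decomposition, no speed claim); return values proved equal on the whole domain.

-- shared dict primitives (dict = assoc list, lookup = first match)
-- Python truthiness of an optional string value: present and non-empty
def truthyS : Option String → Bool
  | some s => decide (s ≠ "")
  | none => false

-- d.get(k) on a dict represented as an assoc list (first match)
def pvGet {α : Type} (l : List (String × α)) (k : String) : Option α :=
  (l.find? (fun p => p.1 == k)).map (fun p => p.2)

-- d[k] = v : overwrite the first occurrence in place, else append
def setk : List (String × String) → String → String → List (String × String)
  | [], k, v => [(k, v)]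
  | p :: t, k, v => if p.1 == k then (k, v) :: t else p :: setk t k v

def keys3 : List String := ["ownerName", "icpTier", "category"]

-- ===== PORT A =====
-- one iteration of A's for-loop: fill k from (already resolved) parent if missing
def fillStep (parent : List (String × String)) (f : List (String × String)) (k : String) : List (String × String) :=
  if !truthyS (pvGet f k) && truthyS (pvGet parent k) then setk f k ((pvGet parent k).getD "") else f

def resolve_with_inheritance (entry : Option (List (String × String))) (hs_id_map : List (String × List (String × String))) (depth : Int) : Option (List (String × String)) :=
  match entry with
  | none => none        -- `if not entry ...: return entry`
  | some e =>
    if h : e = [] ∨ depth > 3 then some e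
    else
      let filled := e   -- dict(entry): a copy, value-identical under the list representation
      if truthyS (pvGet filled "ownerName") && truthyS (pvGet filled "icpTier") && truthyS (pvGet filled "category") then some filled
      else
        match pvGet filled "parentId" with
        | some pid =>
          if pid ≠ "" then
            match pvGet hs_id_map pid with
            | some praw =>
              let parent := (resolve_with_inheritance (some praw) hs_id_map (depth + 1)).getD []
              some (keys3.foldl (fillStep parent) filled)
            | none => some filled
          else some filled
        | none => some filled
termination_by (4 - depth).toNat
decreasing_by push_neg at h; omega

-- ===== PORT B =====
-- the while-loop: collect the ancestor chain reachable within the depth window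
def chainWalk (hs_id_map : List (String × List (String × String))) (cur : List (String × String)) (i : Int) : List (List (String × String)) :=
  if _h : i ≤ 3 then
    match pvGet cur "parentId" with
    | some pid =>
      if pid ≠ "" then
        match pvGet hs_id_map pid with
        | some parent => parent :: chainWalk hs_id_map parent (i + 1)
        | none => []
      else []
    | none => []
  else []
termination_by (4 - i).toNat
decreasing_by omega

-- next((a[k] for a in chain if a.get(k)), None)
def firstWith (chain : List (List (String × String))) (k : String) : Option String :=
  match chain.find? (fun a => truthyS (pvGet a k)) with
  | some a => pvGet a k
  | none => none

-- one iteration of B's final for-loop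
def chStep (chain : List (List (String × String))) (f : List (String × String)) (k : String) : List (String × String) :=
  if !truthyS (pvGet f k) then
    match firstWith chain k with
    | some v => setk f k v
    | none => f
  else f

def resolveChain (e : List (String × String)) (chain : List (List (String × String)))  : List (String × String) :=
  keys3.foldl (chStep chain) e

def resolve_with_inheritance_alt (entry : Option (List (String × String))) (hs_id_map : List (String × List (String × String))) (depth : Int) : Option (List (String × String)) :=
  match entry with
  | none => none
  | some e =>
    if e = [] ∨ depth > 3 then some e
    else some (resolveChain e (chainWalk hs_id_map e depth))

-- ===== PRECONDITION & SPEC =====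
-- A is total on the domain (no Pre_).
def Spec_resolve_with_inheritance (entry : Option (List (String × String))) (hs_id_map : List (String × List (String × String))) (depth : Int) (out : Option (List (String × String))) : Prop := out = resolve_with_inheritance_alt entry hs_id_map depth
instance (entry : Option (List (String × String))) (hs_id_map : List (String × List (String × String))) (depth : Int) (out : Option (List (String × String))) : Decidable (Spec_resolve_with_inheritance entry hs_id_map depth out) := by unfold Spec_resolve_with_inheritance; infer_instance

-- ===== CLAIM (what is proved, stated in full; the proofs are below) =====
def Claim_equal_resolve_with_inheritance : Prop := ∀ (entry : Option (List (String × String))) (hs_id_map : List (String × List (String × String))) (depth : Int), Dom_resolve_with_inheritance entry hs_id_map depth → Spec_resolve_with_inheritance entry hs_id_map depth (resolve_with_inheritance entry hs_id_map depth)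

-- ===== LEMMAS AND PROOFS =====

lemma pvGet_setk_self (f : List (String × String)) (k v : String) : pvGet (setk f k v) k = some v := by
  induction f with
  | nil => simp [setk, pvGet]
  | cons p t ih =>
    by_cases h : p.1 = k
    · simp [setk, pvGet, h]
    · simp [setk, pvGet, h, List.find?]
      simpa [pvGet] using ih

lemma pvGet_setk_ne (f : List (String × String)) (k k' v : String) (h : k' ≠ k) :
    pvGet (setk f k' v) k = pvGet f k := by
  have hbeq : (k' == k) = false := by simp [h]
  induction f with
  | nil => simp [setk, pvGet, List.find?, hbeq]
  | cons p t ih =>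
    by_cases hp : p.1 = k'
    · have h1 : (p.1 == k') = true := by simp [hp]
      have h2 : (p.1 == k) = false := by simp [hp, h]
      simp [setk, pvGet, List.find?, h1, h2, hbeq]
    · have h1 : (p.1 == k') = false := by simp [hp]
      by_cases hk : p.1 = k
      · have h2 : (p.1 == k) = true := by simp [hk]
        simp [setk, pvGet, List.find?, h1, h2]
      · have h2 : (p.1 == k) = false := by simp [hk]
        simp only [setk, h1, Bool.false_eq_true, if_false]
        simp only [pvGet, List.find?, h2]
        simpa [pvGet] using ih

-- the truthiness-guarded view of a field
def tget (d : List (String × String)) (k : String) : Option String :=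
  if truthyS (pvGet d k) then pvGet d k else none

lemma firstWith_cons (p : List (String × String)) (ch : List (List (String × String))) (k : String) :
    firstWith (p :: ch) k = if truthyS (pvGet p k) then pvGet p k else firstWith ch k := by
  by_cases h : truthyS (pvGet p k) <;> simp [firstWith, List.find?, h]

lemma firstWith_truthy (ch : List (List (String × String))) (k v : String)
    (h : firstWith ch k = some v) : truthyS (some v) = true := by
  induction ch with
  | nil => simp [firstWith] at h
  | cons p t ih =>
    rw [firstWith_cons] at h
    by_cases hp : truthyS (pvGet p k)
    · rw [if_pos hp] at h; rw [← h]; exact hp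
    · rw [if_neg hp] at h; exact ih h

lemma chStep_ne (ch : List (List (String × String))) (f : List (String × String)) (k k' : String)
    (h : k' ≠ k) : pvGet (chStep ch f k') k = pvGet f k := by
  unfold chStep
  by_cases ht : truthyS (pvGet f k')
  · simp [ht]
  · simp [ht]
    cases hf : firstWith ch k' with
    | none => rfl
    | some v => exact pvGet_setk_ne f k k' v h

lemma tget_chStep_self (ch : List (List (String × String))) (f : List (String × String)) (k : String) :
    tget (chStep ch f k) k = if truthyS (pvGet f k) then pvGet f k else firstWith ch k := by
  unfold chStep tget
  by_cases ht : truthyS (pvGet f k)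
  · simp [ht]
  · simp [ht]
    cases hf : firstWith ch k with
    | none => simp [ht]
    | some v =>
      have hv := firstWith_truthy ch k v hf
      simp [pvGet_setk_self, hv]

lemma tget_resolveChain (p : List (String × String)) (ch : List (List (String × String)))
    (k : String) (hk : k ∈ keys3) : tget (resolveChain p ch) k = firstWith (p :: ch) k := by
  have howner : ¬ ("icpTier" = "ownerName") := by decide
  have hcat1 : ¬ ("category" = "ownerName") := by decide
  have hcat2 : ¬ ("category" = "icpTier") := by decide
  have hown2 : ¬ ("ownerName" = "icpTier") := by decide
  have hown3 : ¬ ("ownerName" = "category") := by decide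
  have hicp3 : ¬ ("icpTier" = "category") := by decide
  simp only [keys3, List.mem_cons, List.mem_singleton, List.not_mem_nil, or_false] at hk
  unfold resolveChain
  simp only [keys3, List.foldl]
  rcases hk with h | h | h <;> subst h
  · rw [firstWith_cons, tget]
    rw [chStep_ne _ _ _ _ hcat1, chStep_ne _ _ _ _ howner]
    have := tget_chStep_self ch p "ownerName"
    rw [tget] at this
    by_cases ht : truthyS (pvGet (chStep ch p "ownerName") "ownerName") <;> simp [ht] at this ⊢ <;>
      simpa [ht] using this
  · rw [firstWith_cons, tget]
    rw [chStep_ne _ _ _ _ hcat2]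
    have hbase : pvGet (chStep ch p "ownerName") "icpTier" = pvGet p "icpTier" :=
      chStep_ne _ _ _ _ hown2
    have := tget_chStep_self ch (chStep ch p "ownerName") "icpTier"
    rw [tget, hbase] at this
    by_cases ht : truthyS (pvGet (chStep ch (chStep ch p "ownerName") "icpTier") "icpTier") <;>
      simp [ht] at this ⊢ <;> simpa [ht] using this
  · rw [firstWith_cons, tget]
    have hbase : pvGet (chStep ch (chStep ch p "ownerName") "icpTier") "category" = pvGet p "category" := by
      rw [chStep_ne _ _ _ _ hicp3, chStep_ne _ _ _ _ hown3]
    have := tget_chStep_self ch (chStep ch (chStep ch p "ownerName") "icpTier") "category"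
    rw [tget, hbase] at this
    by_cases ht : truthyS (pvGet (chStep ch (chStep ch (chStep ch p "ownerName") "icpTier") "category") "category") <;>
      simp [ht] at this ⊢ <;> simpa [ht] using this

lemma step_eq (RP : List (String × String)) (ch : List (List (String × String))) (k : String)
    (h : tget RP k = firstWith ch k) (f : List (String × String)) :
    fillStep RP f k = chStep ch f k := by
  unfold fillStep chStep
  unfold tget at h
  by_cases hf : truthyS (pvGet f k)
  · simp [hf]
  · by_cases hr : truthyS (pvGet RP k)
    · rw [if_pos hr] at h
      cases hv : pvGet RP k with
      | none => simp [hv, truthyS] at hr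
      | some v =>
        rw [hv] at h hr
        simp [hf, hv, hr, ← h]
    · rw [if_neg hr] at h
      simp [hf, hr, ← h]

lemma foldl_fill_eq (RP : List (String × String)) (ch : List (List (String × String)))
    (e : List (String × String)) (h : ∀ k ∈ keys3, tget RP k = firstWith ch k) :
    keys3.foldl (fillStep RP) e = keys3.foldl (chStep ch) e := by
  have h1 := step_eq RP ch "ownerName" (h _ (by decide))
  have h2 := step_eq RP ch "icpTier" (h _ (by decide))
  have h3 := step_eq RP ch "category" (h _ (by decide))
  simp only [keys3, List.foldl, h1, h2, h3]

lemma chStep_nil (f : List (String × String)) (k : String) : chStep [] f k = f := by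
  unfold chStep
  by_cases hf : truthyS (pvGet f k) <;> simp [hf, firstWith, List.find?]

lemma resolveChain_nil (e : List (String × String)) : resolveChain e [] = e := by
  simp [resolveChain, keys3, List.foldl, chStep_nil]

lemma resolveChain_full (e : List (String × String)) (ch : List (List (String × String)))
    (h1 : truthyS (pvGet e "ownerName") = true) (h2 : truthyS (pvGet e "icpTier") = true)
    (h3 : truthyS (pvGet e "category") = true) : resolveChain e ch = e := by
  simp [resolveChain, keys3, List.foldl, chStep, h1, h2, h3]

lemma main_eq (hs_id_map : List (String × List (String × String))) :
    ∀ (n : Nat) (d : Int) (e : List (String × String)), (4 - d).toNat ≤ n →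
      resolve_with_inheritance (some e) hs_id_map d
        = some (resolveChain e (chainWalk hs_id_map e d)) := by
  intro n
  induction n with
  | zero =>
    intro d e hn
    have hd : d > 3 := by omega
    rw [resolve_with_inheritance, chainWalk]
    simp [hd, resolveChain_nil, show ¬ (d ≤ 3) by omega]
  | succ n ih =>
    intro d e hn
    by_cases hd : d > 3
    · rw [resolve_with_inheritance, chainWalk]
      simp [hd, resolveChain_nil, show ¬ (d ≤ 3) by omega]
    · by_cases he : e = []
      · subst he
        rw [resolve_with_inheritance, chainWalk]
        simp [show (3:Int) ≥ d by omega, pvGet, List.find?, resolveChain_nil]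
      · rw [resolve_with_inheritance]
        have hguard : ¬ (e = [] ∨ d > 3) := by tauto
        rw [dif_neg hguard]
        rw [chainWalk]
        rw [dif_pos (show d ≤ 3 by omega)]
        by_cases hfull : truthyS (pvGet e "ownerName") && truthyS (pvGet e "icpTier") && truthyS (pvGet e "category")
        · simp only [hfull, if_true]
          simp only [Bool.and_eq_true] at hfull
          rw [resolveChain_full e _ hfull.1.1 hfull.1.2 hfull.2]
        · simp only [hfull, if_false]
          cases hp : pvGet e "parentId" with
          | none => simp [resolveChain_nil]
          | some pid =>
            by_cases hpe : pid = ""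
            · simp [hpe, resolveChain_nil]
            · simp only [hpe, if_neg, ite_not]
              cases hq : pvGet hs_id_map pid with
              | none => simp [hpe, resolveChain_nil]
              | some praw =>
                simp only [hpe, if_false]
                have hrec := ih (d + 1) praw (by omega)
                rw [hrec]
                simp only [Option.getD_some]
                rw [if_neg Bool.false_ne_true]
                congr 1
                exact foldl_fill_eq _ _ e (fun k hk => tget_resolveChain praw _ k hk)
    
-- ===== VERDICT (by name: the statement is the Claim_ definition above) =====
theorem resolve_with_inheritance_spec : Claim_equal_resolve_with_inheritance := by
  intro entry hs_id_map depth _hdom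
  unfold Spec_resolve_with_inheritance
  cases entry with
  | none => rw [resolve_with_inheritance, resolve_with_inheritance_alt]
  | some e =>
    rw [resolve_with_inheritance_alt]
    by_cases h : e = [] ∨ depth > 3
    · rw [resolve_with_inheritance]
      simp [h]
    · rw [main_eq hs_id_map ((4 - depth).toNat) depth e (le_refl _)]
      simp [h]
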